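-- pv_equiv track=rewrite | github.com/willcarroll125-boop/WebSet | final/scanner.py | CryptographicFailures_JS
-- ===== SOURCE A (Python) =====
-- def CryptographicFailures_JS(java_clean):
--     issues = []
--     weak_algos = ["md5","sha1", "des", "3des", "rc4"]
--     for algo in weak_algos:
--         if algo in java_clean:
--             issues.append({"Threat": "Cryptographic Failure", "Threat Severity": "High", "Message": "Weak algorithm"})
--     if any(k in java_clean for k in ["encryptionKey=", "salt=", "key=", "secret="]):
--         issues.append({"Threat": "Cryptographic Failure", "Threat Severity": "High", "Message": "Hardcoded key/salt detected"})
--     if "Math.random(" in java_clean or "Date.now(" in java_clean: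
--         issues.append({"Threat": "Cryptographic Failure", "Threat Severity": "Medium", "Message": "Weak random generation"})
--     if "localStorage.setItem(" in java_clean or "sessionStorage.setItem(" in java_clean:
--         issues.append({"Threat": "Cryptographic Failure","Threat Severity": "Medium", "Message": "Sensitive data stored in web storage"})
--     if "fetch(" in java_clean and "http://" in java_clean:
--         issues.append({"Threat": "Cryptographic Failure", "Threat Severity": "High", "Message": "Sensitive data sent over HTTP"})
--     return issues
-- ===== SOURCE B (Python) =====
-- # Different algorithm: instead of one substring scan per pattern, make a single
-- # left-to-right positional sweep of the string (a naive multi-pattern matcher)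
-- # that collects the set of indicator substrings present, then derive the report
-- # from that set with set algebra (membership / disjointness / superset tests).
--
-- _PATTERNS = ["md5", "sha1", "des", "3des", "rc4",
--              "encryptionKey=", "salt=", "key=", "secret=",
--              "Math.random(", "Date.now(",
--              "localStorage.setItem(", "sessionStorage.setItem(",
--              "fetch(", "http://"]
--
--
-- def CryptographicFailures_JS(java_clean):
--     found = set()
--     for i in range(len(java_clean)):
--         for p in _PATTERNS:
--             if java_clean.startswith(p, i):
--                 found.add(p)
--
--     def issue(sev, msg):
--         return {"Threat": "Cryptographic Failure", "Threat Severity": sev, "Message": msg}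
--
--     issues = [issue("High", "Weak algorithm")
--               for a in ["md5", "sha1", "des", "3des", "rc4"] if a in found]
--     if not found.isdisjoint({"encryptionKey=", "salt=", "key=", "secret="}):
--         issues.append(issue("High", "Hardcoded key/salt detected"))
--     if not found.isdisjoint({"Math.random(", "Date.now("}):
--         issues.append(issue("Medium", "Weak random generation"))
--     if not found.isdisjoint({"localStorage.setItem(", "sessionStorage.setItem("}):
--         issues.append(issue("Medium", "Sensitive data stored in web storage"))
--     if found >= {"fetch(", "http://"}:
--         issues.append(issue("High", "Sensitive data sent over HTTP"))
--     return issues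
-- ===== Notes on version B (the rewrite author's own statement) =====
-- stated objective: alternative
-- what changed: Instead of one substring scan per indicator pattern, B makes a single positional sweep over the string collecting the set of indicator substrings present, then derives the report from that set with set algebra (membership, isdisjoint, superset).
import Mathlib
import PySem

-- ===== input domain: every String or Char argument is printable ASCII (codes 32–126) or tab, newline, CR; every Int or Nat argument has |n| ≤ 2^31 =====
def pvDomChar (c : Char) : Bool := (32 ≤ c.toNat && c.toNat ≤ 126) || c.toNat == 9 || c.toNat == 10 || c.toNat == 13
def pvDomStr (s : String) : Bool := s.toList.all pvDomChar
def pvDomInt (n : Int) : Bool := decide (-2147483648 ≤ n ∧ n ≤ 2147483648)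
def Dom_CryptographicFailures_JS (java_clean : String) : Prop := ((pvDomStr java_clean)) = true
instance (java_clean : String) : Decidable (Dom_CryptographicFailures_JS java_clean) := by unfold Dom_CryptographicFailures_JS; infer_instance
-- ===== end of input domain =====

-- B replaces A's one-substring-scan-per-pattern checks by a single positional sweep of the
-- string that collects the set of indicator substrings present, then derives the report
-- from that set (alternative algorithm, same return value).

-- ===== PORT A =====
def CryptographicFailures_JS (java_clean : String) : List (List (String × String)) :=
  let issues : List (List (String × String)) := []
  let weak_algos : List String := ["md5", "sha1", "des", "3des", "rc4"]
  let issues := weak_algos.foldl (fun issues algo =>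
    if PySem.Str.isIn algo java_clean then
      issues ++ [[("Threat", "Cryptographic Failure"), ("Threat Severity", "High"), ("Message", "Weak algorithm")]]
    else issues) issues
  let issues := if (["encryptionKey=", "salt=", "key=", "secret="] : List String).any (fun k => PySem.Str.isIn k java_clean) then
      issues ++ [[("Threat", "Cryptographic Failure"), ("Threat Severity", "High"), ("Message", "Hardcoded key/salt detected")]]
    else issues
  let issues := if PySem.Str.isIn "Math.random(" java_clean || PySem.Str.isIn "Date.now(" java_clean then
      issues ++ [[("Threat", "Cryptographic Failure"), ("Threat Severity", "Medium"), ("Message", "Weak random generation")]]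
    else issues
  let issues := if PySem.Str.isIn "localStorage.setItem(" java_clean || PySem.Str.isIn "sessionStorage.setItem(" java_clean then
      issues ++ [[("Threat", "Cryptographic Failure"), ("Threat Severity", "Medium"), ("Message", "Sensitive data stored in web storage")]]
    else issues
  let issues := if PySem.Str.isIn "fetch(" java_clean && PySem.Str.isIn "http://" java_clean then
      issues ++ [[("Threat", "Cryptographic Failure"), ("Threat Severity", "High"), ("Message", "Sensitive data sent over HTTP")]]
    else issues
  issues

-- ===== PORT B =====
def pvPatterns : List String :=
  ["md5", "sha1", "des", "3des", "rc4",
   "encryptionKey=", "salt=", "key=", "secret=",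
   "Math.random(", "Date.now(",
   "localStorage.setItem(", "sessionStorage.setItem(",
   "fetch(", "http://"]

-- java_clean.startswith(p, i) with 0 ≤ i is exactly startswith of the drop-i suffix
def pvFound (cs : List Char) : PySem.Set String :=
  (List.range cs.length).foldl
    (fun found i => pvPatterns.foldl
      (fun found p =>
        if PySem.Chars.startswith (cs.drop i) p.toList then PySem.Set.add found p else found)
      found)
    PySem.Set.empty

def pvIssue (sev msg : String) : List (String × String) :=
  [("Threat", "Cryptographic Failure"), ("Threat Severity", sev), ("Message", msg)]

def CryptographicFailures_JS_alt (java_clean : String) : List (List (String × String)) :=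
  let found := pvFound java_clean.toList
  let issues := ((["md5", "sha1", "des", "3des", "rc4"] : List String).filter
      (fun a => PySem.Set.contains found a)).map (fun _ => pvIssue "High" "Weak algorithm")
  let issues := if !(PySem.Set.isdisjoint found (PySem.Set.ofList ["encryptionKey=", "salt=", "key=", "secret="])) then
      issues ++ [pvIssue "High" "Hardcoded key/salt detected"] else issues
  let issues := if !(PySem.Set.isdisjoint found (PySem.Set.ofList ["Math.random(", "Date.now("])) then
      issues ++ [pvIssue "Medium" "Weak random generation"] else issues
  let issues := if !(PySem.Set.isdisjoint found (PySem.Set.ofList ["localStorage.setItem(", "sessionStorage.setItem("])) then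
      issues ++ [pvIssue "Medium" "Sensitive data stored in web storage"] else issues
  let issues := if PySem.Set.issuperset found (PySem.Set.ofList ["fetch(", "http://"]) then
      issues ++ [pvIssue "High" "Sensitive data sent over HTTP"] else issues
  issues

-- ===== PRECONDITION & SPEC =====
def Spec_CryptographicFailures_JS (java_clean : String) (out : List (List (String × String))) : Prop := out = CryptographicFailures_JS_alt java_clean
instance (java_clean : String) (out : List (List (String × String))) : Decidable (Spec_CryptographicFailures_JS java_clean out) := by unfold Spec_CryptographicFailures_JS; infer_instance

-- ===== CLAIM (what is proved, stated in full; the proofs are below) =====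
def Claim_equal_CryptographicFailures_JS : Prop := ∀ (java_clean : String), Dom_CryptographicFailures_JS java_clean → Spec_CryptographicFailures_JS java_clean (CryptographicFailures_JS java_clean)

-- ===== LEMMAS AND PROOFS =====

-- membership after one position's pass over the pattern list
theorem pv_mem_inner (cs : List Char) (i : Nat) :
    ∀ (pats : List String) (f : PySem.Set String) (x : String),
      x ∈ pats.foldl (fun found p =>
        if PySem.Chars.startswith (cs.drop i) p.toList then PySem.Set.add found p else found) f ↔
      x ∈ f ∨ (x ∈ pats ∧ PySem.Chars.startswith (cs.drop i) x.toList = true) := by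
  intro pats
  induction pats with
  | nil => simp
  | cons p t ih =>
    intro f x
    rw [List.foldl_cons]
    by_cases h : PySem.Chars.startswith (cs.drop i) p.toList = true
    · rw [if_pos h, ih]
      simp only [PySem.Set.mem_add, List.mem_cons]
      constructor
      · rintro (⟨hf | rfl⟩ | ⟨ht, hs⟩)
        · exact Or.inl hf
        · exact Or.inr ⟨Or.inl rfl, h⟩
        · exact Or.inr ⟨Or.inr ht, hs⟩
      · rintro (hf | ⟨(rfl | ht), hs⟩)
        · exact Or.inl (Or.inl hf)
        · exact Or.inl (Or.inr rfl)
        · exact Or.inr ⟨ht, hs⟩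
    · rw [if_neg h, ih]
      simp only [List.mem_cons]
      constructor
      · rintro (hf | ⟨ht, hs⟩)
        · exact Or.inl hf
        · exact Or.inr ⟨Or.inr ht, hs⟩
      · rintro (hf | ⟨(rfl | ht), hs⟩)
        · exact Or.inl hf
        · exact absurd hs h
        · exact Or.inr ⟨ht, hs⟩

theorem pv_mem_found_range (cs : List Char) :
    ∀ (n : Nat) (x : String),
      x ∈ (List.range n).foldl
        (fun found i => pvPatterns.foldl
          (fun found p =>
            if PySem.Chars.startswith (cs.drop i) p.toList then PySem.Set.add found p else found)
          found) PySem.Set.empty ↔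
      x ∈ pvPatterns ∧ ∃ i < n, PySem.Chars.startswith (cs.drop i) x.toList = true := by
  intro n
  induction n with
  | zero => simp [PySem.Set.empty]
  | succ m ih =>
    intro x
    rw [List.range_succ, List.foldl_append]
    simp only [List.foldl, pv_mem_inner, ih]
    constructor
    · rintro (⟨hp, i, hi, hs⟩ | ⟨hp, hs⟩)
      · exact ⟨hp, i, Nat.lt_succ_of_lt hi, hs⟩
      · exact ⟨hp, m, Nat.lt_succ_self m, hs⟩
    · rintro ⟨hp, i, hi, hs⟩
      rcases Nat.lt_succ_iff_lt_or_eq.mp hi with h | rfl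
      · exact Or.inl ⟨hp, i, h, hs⟩
      · exact Or.inr ⟨hp, hs⟩

-- the sweep finds exactly the present patterns
theorem pv_mem_pvFound (s : String) (x : String) (hx : x.toList ≠ []) :
    x ∈ pvFound s.toList ↔ x ∈ pvPatterns ∧ PySem.Str.isIn x s = true := by
  unfold pvFound
  rw [pv_mem_found_range]
  have hbridge : (∃ i < s.toList.length, PySem.Chars.startswith (s.toList.drop i) x.toList = true) ↔
      PySem.Str.isIn x s = true := by
    rw [show PySem.Str.isIn x s = PySem.Chars.isIn x.toList s.toList from by simp [pysem]]
    rw [← PySem.Chars.exists_prefix_drop_iff_isIn]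
    constructor
    · rintro ⟨i, _, hs⟩
      exact ⟨i, (PySem.Chars.startswith_iff _ _).mp hs⟩
    · rintro ⟨j, hj⟩
      by_cases h : j < s.toList.length
      · exact ⟨j, h, (PySem.Chars.startswith_iff _ _).mpr hj⟩
      · exfalso
        rw [List.drop_eq_nil_of_le (Nat.le_of_not_lt h)] at hj
        exact hx (List.prefix_nil.mp hj)
  rw [hbridge]

theorem pv_contains_pvFound (s : String) (x : String) (hx : x.toList ≠ []) (hm : x ∈ pvPatterns) :
    PySem.Set.contains (pvFound s.toList) x = PySem.Str.isIn x s := by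
  rw [Bool.eq_iff_iff, PySem.Set.contains_iff, pv_mem_pvFound s x hx]
  exact ⟨fun h => h.2, fun h => ⟨hm, h⟩⟩

-- set-algebra tests on the found-set, read back as per-pattern membership tests
theorem pv_isdisjoint_ofList (found : PySem.Set String) (t : List String) :
    (!(PySem.Set.isdisjoint found (PySem.Set.ofList t))) = t.any (fun x => PySem.Set.contains found x) := by
  rw [Bool.eq_iff_iff]
  simp only [PySem.Set.isdisjoint, Bool.not_not, List.any_eq_true, PySem.Set.contains_iff,
    PySem.Set.mem_ofList]
  exact ⟨fun ⟨x, hx, ht⟩ => ⟨x, ht, hx⟩, fun ⟨x, hx, ht⟩ => ⟨x, ht, hx⟩⟩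

theorem pv_issuperset_ofList (found : PySem.Set String) (t : List String) :
    PySem.Set.issuperset found (PySem.Set.ofList t) = t.all (fun x => PySem.Set.contains found x) := by
  rw [Bool.eq_iff_iff]
  simp only [PySem.Set.issuperset, PySem.Set.issubset, List.all_eq_true, PySem.Set.contains_iff,
    PySem.Set.mem_ofList]

-- A's per-match append loop equals one append of a replicate of the matching count
theorem pv_foldl_if_append {α β : Type} (p : α → Bool) (e : β) :
    ∀ (l : List α) (is : List β),
      l.foldl (fun is a => if p a then is ++ [e] else is) is
        = is ++ List.replicate (l.filter p).length e := by
  intro l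
  induction l with
  | nil => simp
  | cons a t ih =>
    intro is
    by_cases h : p a <;>
      simp [List.foldl, h, ih, List.replicate_succ]

-- ===== VERDICT (by name: the statement is the Claim_ definition above) =====
set_option maxHeartbeats 2000000 in
theorem CryptographicFailures_JS_spec : Claim_equal_CryptographicFailures_JS := by
  intro s _
  unfold Spec_CryptographicFailures_JS CryptographicFailures_JS CryptographicFailures_JS_alt
  have hc : ∀ (x : String), x.toList ≠ [] → x ∈ pvPatterns →
      PySem.Set.contains (pvFound s.toList) x = PySem.Str.isIn x s :=
    fun x hx hm => pv_contains_pvFound s x hx hm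
  have hweak : List.filter (fun a => PySem.Set.contains (pvFound s.toList) a)
        ["md5", "sha1", "des", "3des", "rc4"]
      = List.filter (fun a => PySem.Str.isIn a s) ["md5", "sha1", "des", "3des", "rc4"] := by
    simp only [List.filter_cons, List.filter_nil,
      hc "md5" (by decide) (by decide), hc "sha1" (by decide) (by decide),
      hc "des" (by decide) (by decide), hc "3des" (by decide) (by decide),
      hc "rc4" (by decide) (by decide)]
  simp only [pv_foldl_if_append, hweak, List.map_const', List.nil_append, pvIssue,
    pv_isdisjoint_ofList, pv_issuperset_ofList, List.any_cons, List.any_nil,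
    List.all_cons, List.all_nil, Bool.or_false, Bool.and_true,
    hc "encryptionKey=" (by decide) (by decide), hc "salt=" (by decide) (by decide),
    hc "key=" (by decide) (by decide), hc "secret=" (by decide) (by decide),
    hc "Math.random(" (by decide) (by decide), hc "Date.now(" (by decide) (by decide),
    hc "localStorage.setItem(" (by decide) (by decide),
    hc "sessionStorage.setItem(" (by decide) (by decide),
    hc "fetch(" (by decide) (by decide), hc "http://" (by decide) (by decide)]
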